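-- pv_equiv track=rewrite | github.com/dimk00z/summer_yandex_algorithmic_course | Homework_5/I_Robot/I_Robot.py | calculate_variants
-- ===== SOURCE A (Python) =====
-- def calculate_variants(k, commands):
--     ans = 0
--     prevlen = 0
--     for i in range(k, len(commands)):
--         if commands[i] == commands[i-k]:
--             prevlen += 1
--             ans += prevlen
--         else:
--             prevlen = 0
--     return ans
-- ===== SOURCE B (Python) =====
-- def calculate_variants(k, commands):
--     n = len(commands)
--
--     def same(i):
--         return commands[i] == commands[i - k]
--
--     ans = 0
--     i = k
--     while i < n:
--         if same(i):
--             j = i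
--             while j < n and same(j):
--                 j += 1
--             length = j - i
--             ans += length * (length + 1) // 2
--             i = j
--         else:
--             i += 1
--     return ans
-- ===== Notes on version B (the rewrite author's own statement) =====
-- stated objective: alternative
-- what changed: replaces the per-element triangular accumulation (ans += prevlen each step) by a two-pointer run scanner that skips over each maximal run of matches and adds its closed-form contribution L*(L+1)//2 once per run
import Mathlib
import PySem

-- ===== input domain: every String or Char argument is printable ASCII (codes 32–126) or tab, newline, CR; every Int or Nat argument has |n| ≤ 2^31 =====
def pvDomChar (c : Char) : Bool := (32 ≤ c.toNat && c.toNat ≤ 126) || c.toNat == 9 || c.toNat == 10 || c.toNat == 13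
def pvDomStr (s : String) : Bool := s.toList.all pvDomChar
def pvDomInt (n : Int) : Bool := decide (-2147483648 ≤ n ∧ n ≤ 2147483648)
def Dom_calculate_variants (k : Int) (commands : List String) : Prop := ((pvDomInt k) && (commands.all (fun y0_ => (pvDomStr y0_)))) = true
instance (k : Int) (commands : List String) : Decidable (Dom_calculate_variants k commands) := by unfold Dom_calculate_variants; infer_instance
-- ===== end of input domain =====

-- B replaces A's per-element triangular accumulation by a two-pointer scanner that
-- skips each maximal run of matches and adds its closed-form value L*(L+1)//2 once
-- per run (objective: alternative decomposition, same O(n) cost).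

-- ===== PORT A =====
def calculate_variants (k : Int) (commands : List String) : Int :=
  ((PySem.List.pyRange k (commands.length : Int) 1).foldl
    (fun (s : Int × Int) (i : Int) =>
      if PySem.List.pyGetD commands i "" = PySem.List.pyGetD commands (i - k) "" then
        (s.1 + (s.2 + 1), s.2 + 1)
      else (s.1, 0)) ((0 : Int), (0 : Int))).1

-- ===== PORT B =====
-- Source B's helper `same(i)`
def pvSame (commands : List String) (k i : Int) : Bool :=
  PySem.List.pyGetD commands i "" = PySem.List.pyGetD commands (i - k) ""

-- Source B's inner while loop: advance j while j < n and same(j)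
def pvRunEnd (commands : List String) (k n j : Int) : Int :=
  if h : j < n ∧ pvSame commands k j then pvRunEnd commands k n (j + 1) else j
termination_by (n - j).toNat
decreasing_by omega

-- termination fact for the outer loop (pvRuns cites it in decreasing_by)
lemma pvRunEnd_ge (commands : List String) (k n j : Int) : j ≤ pvRunEnd commands k n j := by
  fun_induction pvRunEnd commands k n j with
  | case1 j h ih => omega
  | case2 j h => omega

-- Source B's outer while loop with accumulator ans
def pvRuns (commands : List String) (k n i ans : Int) : Int :=
  if h : i < n then
    if hm : pvSame commands k i then
      let j := pvRunEnd commands k n i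
      pvRuns commands k n j (ans + PySem.Int.floordiv ((j - i) * ((j - i) + 1)) 2)
    else pvRuns commands k n (i + 1) ans
  else ans
termination_by (n - i).toNat
decreasing_by
  · have h1 : i + 1 ≤ pvRunEnd commands k n (i + 1) := pvRunEnd_ge commands k n (i + 1)
    have h2 : pvRunEnd commands k n i = pvRunEnd commands k n (i + 1) := by
      rw [pvRunEnd]; simp [h, hm]
    omega
  · omega

def calculate_variants_alt (k : Int) (commands : List String) : Int :=
  pvRuns commands k (commands.length : Int) k 0

-- ===== PRECONDITION & SPEC =====
-- Pre_ excludes k < 0, on which Python A always raises IndexError (commands[i-k] with i-k ≥ len,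
-- or commands[k] on an empty list); A returns on every k ≥ 0.
def Pre_calculate_variants (k : Int) (commands : List String) : Prop := 0 ≤ k
instance (k : Int) (commands : List String) : Decidable (Pre_calculate_variants k commands) := by unfold Pre_calculate_variants; infer_instance
def pvWitness_calculate_variants : Int × List String := (1, ["a", "a", "b"])

def Spec_calculate_variants (k : Int) (commands : List String) (out : Int) : Prop := out = calculate_variants_alt k commands
instance (k : Int) (commands : List String) (out : Int) : Decidable (Spec_calculate_variants k commands out) := by unfold Spec_calculate_variants; infer_instance

-- ===== CLAIM (what is proved, stated in full; the proofs are below) =====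
def Claim_equal_calculate_variants : Prop := ∀ (k : Int) (commands : List String), Dom_calculate_variants k commands → Pre_calculate_variants k commands → Spec_calculate_variants k commands (calculate_variants k commands)

-- ===== LEMMAS AND PROOFS =====

-- A's loop, resumed from index i with accumulator state s = (ans, prevlen)
def pvFoldA (commands : List String) (k n i : Int) (s : Int × Int) : Int × Int :=
  (PySem.List.pyRange i n 1).foldl
    (fun (s : Int × Int) (i : Int) =>
      if pvSame commands k i then (s.1 + (s.2 + 1), s.2 + 1) else (s.1, 0)) s

lemma calculate_variants_eq_foldA (k : Int) (commands : List String) :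
    calculate_variants k commands = (pvFoldA commands k (commands.length : Int) k (0, 0)).1 := by
  unfold calculate_variants pvFoldA pvSame
  simp

-- Σ_{t=1}^{L} (p + t) = L*p + L(L+1)//2
def pvSum (p L : Int) : Int := L * p + PySem.Int.floordiv (L * (L + 1)) 2

lemma pvSum_zero (p : Int) : pvSum p 0 = 0 := by
  unfold pvSum
  rw [PySem.Int.floordiv_eq_ediv_of_pos (by omega)]
  norm_num

lemma pvSum_step (p L : Int) : pvSum p L = (p + 1) + pvSum (p + 1) (L - 1) := by
  unfold pvSum
  rw [PySem.Int.floordiv_eq_ediv_of_pos (by omega), PySem.Int.floordiv_eq_ediv_of_pos (by omega)]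
  have h1 : L * (L + 1) = (L - 1) * ((L - 1) + 1) + 2 * L := by ring
  have h2 : (2 : Int) ∣ (L - 1) * ((L - 1) + 1) := (Int.even_mul_succ_self (L - 1)).two_dvd
  have h3 : L * p = (L - 1) * (p + 1) + p - L + 1 := by ring
  omega

lemma pvRunEnd_post (commands : List String) (k n j : Int) :
    ¬ (pvRunEnd commands k n j < n ∧ pvSame commands k (pvRunEnd commands k n j)) := by
  fun_induction pvRunEnd commands k n j with
  | case1 j h ih => exact ih
  | case2 j h => exact h

lemma foldA_run (commands : List String) (k n j : Int) :
    ∀ (ans p : Int), pvFoldA commands k n j (ans, p) =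
      pvFoldA commands k n (pvRunEnd commands k n j)
        (ans + pvSum p (pvRunEnd commands k n j - j), p + (pvRunEnd commands k n j - j)) := by
  fun_induction pvRunEnd commands k n j with
  | case1 j h ih =>
    intro ans p
    have hcons := PySem.List.pyRange_one_cons h.1
    unfold pvFoldA
    rw [hcons, List.foldl_cons]
    simp only [h.2, if_true]
    have hrec := ih (ans + (p + 1)) (p + 1)
    unfold pvFoldA at hrec
    rw [hrec]
    set e := pvRunEnd commands k n (j + 1) with he
    have h1 : ans + (p + 1) + pvSum (p + 1) (e - (j + 1)) = ans + pvSum p (e - j) := by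
      have hstep := pvSum_step p (e - j)
      have hE : e - (j + 1) = e - j - 1 := by ring
      rw [hE]
      linarith
    have h2 : p + 1 + (e - (j + 1)) = p + (e - j) := by ring
    rw [h1, h2]
  | case2 j h =>
    intro ans p
    simp only [sub_self, pvSum_zero, add_zero]

lemma foldA_eq_pvRuns (commands : List String) (k n : Int) :
    ∀ (m : Nat) (i ans : Int), (n - i).toNat ≤ m →
      (pvFoldA commands k n i (ans, 0)).1 = pvRuns commands k n i ans := by
  intro m
  induction m with
  | zero =>
    intro i ans hm
    have hni : n ≤ i := by omega
    unfold pvFoldA pvRuns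
    rw [PySem.List.pyRange_one_eq_nil hni]
    simp [show ¬ i < n by omega]
  | succ m ih =>
    intro i ans hm
    by_cases hin : i < n
    · by_cases hs : pvSame commands k i
      · -- a run starts at i: consume it with foldA_run
        set j := pvRunEnd commands k n i with hj
        have hji : i + 1 ≤ j := by
          have h1 : pvRunEnd commands k n i = pvRunEnd commands k n (i + 1) := by
            rw [pvRunEnd]; simp [hin, hs]
          have h2 := pvRunEnd_ge commands k n (i + 1)
          omega
        have hpost := pvRunEnd_post commands k n i
        rw [← hj] at hpost
        rw [foldA_run commands k n i ans 0]
        rw [← hj]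
        simp only [zero_add]
        have hsum : pvSum 0 (j - i) = PySem.Int.floordiv ((j - i) * ((j - i) + 1)) 2 := by
          unfold pvSum; ring_nf
        rw [hsum]
        conv_rhs => rw [pvRuns]
        simp only [hin, dif_pos, hs, ← hj]
        by_cases hjn : j < n
        · have hns : ¬ pvSame commands k j = true := fun hc => hpost ⟨hjn, hc⟩
          have hstep : ∀ x : Int, (pvFoldA commands k n j (x, j - i)).1 = (pvFoldA commands k n (j + 1) (x, 0)).1 := by
            intro x
            unfold pvFoldA
            rw [PySem.List.pyRange_one_cons hjn, List.foldl_cons]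
            simp [hns]
          rw [hstep, ih (j + 1) _ (by omega)]
          conv_rhs => rw [pvRuns]
          simp [hjn, hns]
        · unfold pvFoldA
          rw [PySem.List.pyRange_one_eq_nil (by omega)]
          conv_rhs => rw [pvRuns]
          simp [show ¬ j < n from hjn]
      · -- no match at i: both sides step to i + 1
        have hstep : (pvFoldA commands k n i (ans, 0)).1 = (pvFoldA commands k n (i + 1) (ans, 0)).1 := by
          unfold pvFoldA
          rw [PySem.List.pyRange_one_cons hin, List.foldl_cons]
          simp [hs]
        rw [hstep, ih (i + 1) ans (by omega)]
        conv_rhs => rw [pvRuns]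
        simp [hin, hs]
    · unfold pvFoldA
      rw [PySem.List.pyRange_one_eq_nil (by omega)]
      conv_rhs => rw [pvRuns]
      simp [hin]

-- ===== VERDICT (by name: the statement is the Claim_ definition above) =====
theorem calculate_variants_spec : Claim_equal_calculate_variants := by
  intro k commands _ _
  unfold Spec_calculate_variants calculate_variants_alt
  rw [calculate_variants_eq_foldA]
  exact foldA_eq_pvRuns commands k (commands.length : Int) ((commands.length : Int) - k).toNat k 0 le_rfl
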